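-- pv_equiv track=rewrite | github.com/mozilla-mobile/mozilla-vpn-client | taskcluster/mozillavpn_taskgraph/loader/functional.py | script2name
-- ===== SOURCE A (Python) =====
-- def script2words(script):
--     # Strip the 'test' prefix and '.js' suffix.
--     camelcase = script[4:-3]
--     words = []
--     for char in camelcase:
--         if len(words) != 0 and char.islower():
--             words[-1] += char
--         else:
--             words.append(char.lower())
--
--     return words
--
-- def script2name(script):
--     # Rename some tests that are too long.
--     # The name must be less than 25 chars long.
--     rename = {
--         'authentication': 'auth',
--         'errors': 'err',
--     }
--     return '-'.join(
--         rename[word] if word in rename else word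
--         for word in script2words(script)
--     )
-- ===== SOURCE B (Python) =====
-- RENAME = {'authentication': 'auth', 'errors': 'err'}
--
-- def script2words(script):
--     # Strip the 'test' prefix and '.js' suffix, then cut word-at-a-time:
--     # each word is one leading char (lowered) plus its run of lowercase chars.
--     words = []
--     rest = script[4:-3]
--     while rest:
--         i = 1
--         while i < len(rest) and rest[i].islower():
--             i += 1
--         words.append(rest[0].lower() + rest[1:i])
--         rest = rest[i:]
--     return words
--
-- def script2name(script):
--     # Rename some tests that are too long.
--     # The name must be less than 25 chars long.
--     return '-'.join(RENAME.get(word, word) for word in script2words(script))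
-- ===== Notes on version B (the rewrite author's own statement) =====
-- stated objective: faster
-- what changed: script2words is rewritten from A's char-by-char fold that rebuilds the last accumulated word via words[-1] += char (quadratic on long lowercase runs) into a word-at-a-time scan that slices each word out once: lowered head char plus its run of lowercase chars.
import Mathlib
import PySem

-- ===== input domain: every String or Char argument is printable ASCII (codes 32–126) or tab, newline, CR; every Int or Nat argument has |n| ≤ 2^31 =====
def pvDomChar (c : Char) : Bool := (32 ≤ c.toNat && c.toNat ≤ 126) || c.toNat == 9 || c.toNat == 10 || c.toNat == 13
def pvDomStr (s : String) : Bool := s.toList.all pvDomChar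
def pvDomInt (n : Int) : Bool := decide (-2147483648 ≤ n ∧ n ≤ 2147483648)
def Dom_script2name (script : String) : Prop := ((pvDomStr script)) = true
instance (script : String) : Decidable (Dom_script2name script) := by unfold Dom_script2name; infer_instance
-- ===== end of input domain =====

-- B rewrites script2words to cut the camelCase string word-at-a-time (each word
-- sliced out once: head char lowered plus its run of lowercase chars) instead of
-- A's char-by-char fold that rebuilds words[-1] on every lowercase char; the
-- timing run measured B faster (A's repeated concatenation is quadratic in a run).

-- shared by both ports: the literal rename table lookup of script2name
def pvRename (w : List Char) : List Char :=
  if w = "authentication".toList then "auth".toList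
  else if w = "errors".toList then "err".toList
  else w

-- ===== PORT A =====
-- one step of A's loop body: append to words[-1] or push a new lowered char
def pvStepA (words : List (List Char)) (c : Char) : List (List Char) :=
  if words.length ≠ 0 ∧ PySem.Chars.islower c then
    words.dropLast ++ [(words.getLast?.getD []) ++ [c]]
  else
    words ++ [[PySem.Chars.lowerChar c]]

def pvWordsA (script : String) : List (List Char) :=
  ((PySem.Str.slice script (some 4) (some (-3))).toList).foldl pvStepA []

def script2name (script : String) : String :=
  String.ofList (PySem.Chars.join ['-'] ((pvWordsA script).map pvRename))

-- ===== PORT B =====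
-- B's scanning loop: each word = lowered head ++ takeWhile islower of the tail
def pvWordsBGo : List Char → List (List Char)
  | [] => []
  | c :: rest =>
      (PySem.Chars.lowerChar c :: rest.takeWhile (fun d => PySem.Chars.islower d))
        :: pvWordsBGo (rest.dropWhile (fun d => PySem.Chars.islower d))
  termination_by l => l.length
  decreasing_by
    simpa using Nat.lt_succ_of_le (List.length_dropWhile_le _ _)

def pvWordsB (script : String) : List (List Char) :=
  pvWordsBGo ((PySem.Str.slice script (some 4) (some (-3))).toList)

def script2name_alt (script : String) : String :=
  String.ofList (PySem.Chars.join ['-'] ((pvWordsB script).map pvRename))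

-- ===== PRECONDITION & SPEC =====
def Spec_script2name (script : String) (out : String) : Prop := out = script2name_alt script
instance (script : String) (out : String) : Decidable (Spec_script2name script out) := by unfold Spec_script2name; infer_instance

-- ===== CLAIM (what is proved, stated in full; the proofs are below) =====
def Claim_equal_script2name : Prop := ∀ (script : String), Dom_script2name script → Spec_script2name script (script2name script)

-- ===== LEMMAS AND PROOFS =====

lemma pv_invariant (cs : List Char) : ∀ (ws : List (List Char)) (w : List Char),
    List.foldl pvStepA (ws ++ [w]) cs =
      ws ++ [w ++ cs.takeWhile (fun d => PySem.Chars.islower d)]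
         ++ pvWordsBGo (cs.dropWhile (fun d => PySem.Chars.islower d)) := by
  induction cs with
  | nil => intro ws w; simp [pvWordsBGo]
  | cons c cs ih =>
    intro ws w
    by_cases h : PySem.Chars.islower c
    · have hstep : pvStepA (ws ++ [w]) c = ws ++ [w ++ [c]] := by
        simp [pvStepA, h]
      simp only [List.foldl_cons, hstep, ih ws (w ++ [c]),
        List.takeWhile_cons, List.dropWhile_cons, h]
      simp
    · have hstep : pvStepA (ws ++ [w]) c = (ws ++ [w]) ++ [[PySem.Chars.lowerChar c]] := by
        simp [pvStepA, h]
      simp only [List.foldl_cons, hstep, ih (ws ++ [w]) [PySem.Chars.lowerChar c],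
        List.takeWhile_cons, List.dropWhile_cons, h]
      simp [pvWordsBGo]

lemma pv_words_eq (cs : List Char) : List.foldl pvStepA [] cs = pvWordsBGo cs := by
  cases cs with
  | nil => simp [pvWordsBGo]
  | cons c cs =>
    have hstep : pvStepA [] c = [] ++ [[PySem.Chars.lowerChar c]] := by
      simp [pvStepA, PySem.Chars.islower]
    simp only [List.foldl_cons, hstep, pv_invariant cs [] [PySem.Chars.lowerChar c]]
    simp [pvWordsBGo]

-- ===== VERDICT (by name: the statement is the Claim_ definition above) =====
theorem script2name_spec : Claim_equal_script2name := by
  intro script _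
  unfold Spec_script2name script2name script2name_alt pvWordsA pvWordsB
  rw [pv_words_eq]
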